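-- pv_equiv track=rewrite | github.com/raffivar/SelfPy | unit_7_loops/loop_arrows.py | arrow
-- ===== SOURCE A (Python) =====
-- def arrow(my_char, max_length):
--     res = ""
--     for amount in range(1, max_length + 1):
--         res += (my_char + ' ') * amount
--         res += '\n'
--     for amount in range(max_length - 1, 0, -1):
--         res += (my_char + ' ') * amount
--         res += '\n'
--     return res
-- ===== SOURCE B (Python) =====
-- def arrow(my_char, max_length):
--     # Single pass over all 2n-1 rows: row i (1-based) has closed-form width
--     # n - |n - i|, so no second descending loop and no mirroring is needed.
--     n = max_length
--     return ''.join((my_char + ' ') * (n - abs(n - i)) + '\n' for i in range(1, 2 * n))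
-- ===== Notes on version B (the rewrite author's own statement) =====
-- stated objective: simpler
-- what changed: B replaces A's two sequential generating loops (ascending then descending) with a single pass over all 2n-1 rows whose width is the closed form n - |n - i|, so the mirrored half is never generated separately.
import Mathlib
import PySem

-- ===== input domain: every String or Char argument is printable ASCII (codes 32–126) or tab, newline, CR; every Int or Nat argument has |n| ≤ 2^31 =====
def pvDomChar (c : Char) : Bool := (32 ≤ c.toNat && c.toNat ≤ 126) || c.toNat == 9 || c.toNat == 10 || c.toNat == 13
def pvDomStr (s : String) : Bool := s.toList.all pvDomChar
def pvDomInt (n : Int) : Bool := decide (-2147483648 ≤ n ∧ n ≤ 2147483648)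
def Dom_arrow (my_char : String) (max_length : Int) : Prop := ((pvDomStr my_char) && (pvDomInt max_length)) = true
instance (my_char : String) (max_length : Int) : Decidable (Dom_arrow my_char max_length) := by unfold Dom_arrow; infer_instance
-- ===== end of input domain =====

-- B makes one pass over all 2n-1 rows with the closed-form row width n - |n - i| instead of
-- A's two generating loops (ascending then descending); objective: simpler, same output.

-- ===== PORT A =====
-- A: two loops, each appending '(my_char+" ")*amount' and '\n' to an accumulator.
-- Strings are ported at the List Char level (Python '+' = ++, '*' = PySem.List.pyRepeat).
def arrow (my_char : String) (max_length : Int) : String :=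
  let res : List Char :=
    (PySem.List.pyRange 1 (max_length + 1) 1).foldl
      (fun res amount => res ++ PySem.List.pyRepeat (my_char.toList ++ [' ']) amount ++ ['\n']) []
  let res :=
    (PySem.List.pyRange (max_length - 1) 0 (-1)).foldl
      (fun res amount => res ++ PySem.List.pyRepeat (my_char.toList ++ [' ']) amount ++ ['\n']) res
  String.ofList res

-- ===== PORT B =====
-- B: ''.join over one generator for i in range(1, 2n): row i = (my_char+' ')*(n-|n-i|) + '\n'.
-- ''.join of the rows is flatten at the char level (exact: concatenation, no separator).
def arrow_alt (my_char : String) (max_length : Int) : String :=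
  String.ofList
    (((PySem.List.pyRange 1 (2 * max_length) 1).map
        (fun i => PySem.List.pyRepeat (my_char.toList ++ [' ']) (max_length - |max_length - i|)
                  ++ ['\n'])).flatten)

-- ===== PRECONDITION & SPEC =====
def Spec_arrow (my_char : String) (max_length : Int) (out : String) : Prop := out = arrow_alt my_char max_length
instance (my_char : String) (max_length : Int) (out : String) : Decidable (Spec_arrow my_char max_length out) := by unfold Spec_arrow; infer_instance

-- ===== CLAIM (what is proved, stated in full; the proofs are below) =====
def Claim_equal_arrow : Prop := ∀ (my_char : String) (max_length : Int), Dom_arrow my_char max_length → Spec_arrow my_char max_length (arrow my_char max_length)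

-- ===== LEMMAS AND PROOFS =====

-- A's loop body appends one line per step: the fold is the flattened list of line strings.
theorem foldl_lines (c : List Char) (l : List Int) (s : List Char) :
    l.foldl (fun r a => r ++ PySem.List.pyRepeat c a ++ ['\n']) s
      = s ++ (l.map (fun a => PySem.List.pyRepeat c a ++ ['\n'])).flatten := by
  induction l generalizing s with
  | nil => simp
  | cons x xs ih => rw [List.foldl_cons, ih]; simp

-- reflecting the second half's indices: 2m - i over i = m+1 .. 2m-1 is m-1 .. 1.
theorem rev_range (m : Int) :
    (PySem.List.pyRange (m + 1) (2 * m) 1).map (fun i => 2 * m - i)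
      = (PySem.List.pyRange 1 m 1).reverse := by
  apply List.ext_getElem
  · simp [PySem.List.length_pyRange_one]; omega
  · intro j h1 h2
    simp only [List.getElem_map, List.getElem_reverse, PySem.List.getElem_pyRange_one]
    simp [PySem.List.length_pyRange_one] at h1 h2 ⊢
    omega

-- ===== VERDICT (by name: the statement is the Claim_ definition above) =====
theorem arrow_spec : Claim_equal_arrow := by
  intro my_char m _
  show arrow my_char m = arrow_alt my_char m
  unfold arrow arrow_alt
  dsimp only
  rw [foldl_lines, foldl_lines]
  rw [show PySem.List.pyRange (m - 1) 0 (-1) = (PySem.List.pyRange 1 m 1).reverse from by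
        have h := PySem.List.pyRange_neg_one_eq_reverse (m - 1) 0; simpa using h]
  simp only [List.nil_append]
  rcases le_or_gt m 0 with hm | hm
  · rw [PySem.List.pyRange_one_eq_nil (show m + 1 ≤ 1 by omega),
        PySem.List.pyRange_one_eq_nil (show (m : Int) ≤ 1 by omega),
        PySem.List.pyRange_one_eq_nil (show 2 * m ≤ 1 by omega)]
    simp
  · rw [PySem.List.pyRange_one_append 1 (m + 1) (2 * m) (by omega) (by omega),
        List.map_append, List.flatten_append]
    congr 1
    congr 1
    · apply congrArg List.flatten
      symm
      apply List.map_congr_left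
      intro i hi
      rw [PySem.List.mem_pyRange_one] at hi
      rw [abs_of_nonneg (show (0 : Int) ≤ m - i by omega),
          show m - (m - i) = i from by omega]
    · apply congrArg List.flatten
      symm
      rw [show (PySem.List.pyRange (m + 1) (2 * m) 1).map
            (fun i => PySem.List.pyRepeat (my_char.toList ++ [' ']) (m - |m - i|) ++ ['\n'])
          = ((PySem.List.pyRange (m + 1) (2 * m) 1).map (fun i => 2 * m - i)).map
            (fun a => PySem.List.pyRepeat (my_char.toList ++ [' ']) a ++ ['\n']) from by
          rw [List.map_map]
          apply List.map_congr_left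
          intro i hi
          rw [PySem.List.mem_pyRange_one] at hi
          simp only [Function.comp]
          rw [abs_of_nonpos (show m - i ≤ (0 : Int) by omega),
              show m - -(m - i) = 2 * m - i from by ring]]
      rw [rev_range, List.map_reverse]
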